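-- pv_equiv track=rewrite | github.com/chjw956/python_studying | test/Algo1.py | letsGo
-- ===== SOURCE A (Python) =====
-- def letsGo(arr, N, K):
--     # 캐릭터의 현재 위치
--     i = 2
--
--     # 캐릭터가 현재 이동할 수 있는 칸의 수
--     power = K
--
--     for a in arr:
--         if a == 1:
--             power += K
--         else:
--             power -= 1
--
--         if i == N or power == 0:
--             return i
--         i += 1
--     return -1
-- ===== SOURCE B (Python) =====
-- def letsGo(arr, N, K):
--     # Compute the two possible stop positions independently, then take the earliest.
--     # power after step j is K + sums[j-1]; it hits 0 exactly where the prefix sum is -K.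
--     sums = []
--     s = 0
--     for a in arr:
--         s += K if a == 1 else -1
--         sums.append(s)
--     try:
--         pos0 = sums.index(-K) + 2   # first position where power becomes 0
--     except ValueError:
--         pos0 = None
--     posN = N if 2 <= N <= len(arr) + 1 else None   # position where i == N fires
--     stops = [p for p in (pos0, posN) if p is not None]
--     return min(stops) if stops else -1
-- ===== Notes on version B (the rewrite author's own statement) =====
-- stated objective: alternative
-- what changed: Instead of simulating the walk with an early-exit loop, B computes the two stop positions independently -- the first index where the prefix sum of step deltas equals -K (power hits 0, found with list.index) and the arithmetic position where i == N -- and returns the minimum of the two, or -1 if neither exists.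
import Mathlib
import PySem

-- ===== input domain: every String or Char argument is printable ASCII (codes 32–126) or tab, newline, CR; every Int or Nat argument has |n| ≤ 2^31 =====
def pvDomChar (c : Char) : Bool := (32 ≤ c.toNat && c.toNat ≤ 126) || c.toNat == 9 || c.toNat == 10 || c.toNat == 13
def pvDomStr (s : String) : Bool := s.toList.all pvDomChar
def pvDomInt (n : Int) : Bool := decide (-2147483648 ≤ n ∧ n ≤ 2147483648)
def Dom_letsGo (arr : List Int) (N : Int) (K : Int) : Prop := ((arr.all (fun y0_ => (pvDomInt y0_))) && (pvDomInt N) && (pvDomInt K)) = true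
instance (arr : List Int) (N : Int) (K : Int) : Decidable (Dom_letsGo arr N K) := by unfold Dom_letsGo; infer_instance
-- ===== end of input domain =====

-- B replaces A's early-exit simulation by computing the power-zero position and the i==N position independently and taking their minimum (same cost, different algorithm).
-- ===== PORT A =====
def letsGoAux (arr : List Int) (i : Int) (power : Int) (N : Int) (K : Int) : Int :=
  match arr with
  | [] => -1
  | a :: rest =>
    let power' := if a = 1 then power + K else power - 1
    if i = N ∨ power' = 0 then i else letsGoAux rest (i + 1) power' N K

def letsGo (arr : List Int) (N : Int) (K : Int) : Int :=
  letsGoAux arr 2 K N K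

-- ===== PORT B =====
-- the prefix sums of the step deltas (the loop building `sums` in Source B)
def prefixSums (arr : List Int) (s : Int) (K : Int) : List Int :=
  match arr with
  | [] => []
  | a :: rest =>
    let s' := s + (if a = 1 then K else -1)
    s' :: prefixSums rest s' K

def letsGo_alt (arr : List Int) (N : Int) (K : Int) : Int :=
  let sums := prefixSums arr 0 K
  let posN : Option Int := if 2 ≤ N ∧ N ≤ (arr.length : Int) + 1 then some N else none
  match PySem.List.index? sums (-K), posN with
  | none, none => -1
  | some n, none => (n : Int) + 2
  | none, some q => q
  | some n, some q => min ((n : Int) + 2) q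

-- ===== PRECONDITION & SPEC =====
def Spec_letsGo (arr : List Int) (N : Int) (K : Int) (out : Int) : Prop := out = letsGo_alt arr N K
instance (arr : List Int) (N : Int) (K : Int) (out : Int) : Decidable (Spec_letsGo arr N K out) := by unfold Spec_letsGo; infer_instance

-- ===== CLAIM =====
def Claim_equal_letsGo : Prop := ∀ (arr : List Int) (N : Int) (K : Int), Dom_letsGo arr N K → Spec_letsGo arr N K (letsGo arr N K)

-- ===== LEMMAS AND PROOFS =====
-- the B-side combination, generalized over the base position i
def bcomb (sums : List Int) (K N i len : Int) : Int :=
  match PySem.List.index? sums (-K),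
        (if i ≤ N ∧ N ≤ i + len - 1 then some N else none) with
  | none, none => -1
  | some n, none => (n : Int) + i
  | none, some q => q
  | some n, some q => min ((n : Int) + i) q

theorem key (N K : Int) : ∀ (arr : List Int) (i s : Int),
    letsGoAux arr i (K + s) N K = bcomb (prefixSums arr s K) K N i arr.length := by
  intro arr
  induction arr with
  | nil =>
      intro i s
      simp only [letsGoAux, prefixSums, bcomb, PySem.List.index?, List.idxOf?, List.length_nil, List.findIdx?_nil]
      split_ifs with h
      · exfalso; omega
      · rfl
  | cons a rest ih =>
      intro i s
      have hlen : ((a :: rest).length : Int) = (rest.length : Int) + 1 := by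
        simp
      simp only [letsGoAux, prefixSums]
      set δ : Int := if a = 1 then K else -1 with hδ
      have hpow : (if a = 1 then K + s + K else K + s - 1) = K + (s + δ) := by
        rw [hδ]; split_ifs <;> ring
      by_cases hstop : i = N ∨ K + (s + δ) = 0
      · -- A returns i here; show bcomb also yields i
        rw [hpow]
        simp only [if_pos hstop]
        unfold bcomb
        rcases Classical.em (s + δ = -K) with hz | hz
        · -- head of sums is -K : pos0 = i
          rw [hz, PySem.List.index?_cons_self (-K) (prefixSums rest (-K) K)]
          split_ifs with hN
          · simp only [Nat.cast_zero]; omega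
          · simp
        · -- power ≠ 0, so i = N; pos0 if any is ≥ i
          have hiN : i = N := by
            rcases hstop with h | h
            · exact h
            · exact absurd (by omega : s + δ = -K) hz
          rw [PySem.List.index?_cons_of_ne (prefixSums rest (s + δ) K) (show s + δ ≠ -K from hz)]
          have hNin : i ≤ N ∧ N ≤ i + ((a :: rest).length : Int) - 1 := by
            rw [hlen]; omega
          rw [if_pos hNin]
          cases hrest : PySem.List.index? (prefixSums rest (s + δ) K) (-K) with
          | none => simp [hiN]
          | some n =>
              simp only [Option.map_some]
              have : (((n + 1 : Nat)) : Int) + i ≥ N := by omega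
              omega
      · -- recurse
        rw [hpow]
        simp only [if_neg hstop]
        rw [ih (i + 1) (s + δ)]
        unfold bcomb
        have hz : s + δ ≠ -K := by
          intro h; exact hstop (Or.inr (by omega))
        rw [PySem.List.index?_cons_of_ne (prefixSums rest (s + δ) K) hz]
        have hiN : i ≠ N := fun h => hstop (Or.inl h)
        have hiff2 : (i ≤ N ∧ N ≤ i + ((a :: rest).length : Int) - 1)
            ↔ (i + 1 ≤ N ∧ N ≤ i + 1 + (rest.length : Int) - 1) := by
          rw [hlen]
          constructor
          · intro h; exact ⟨by omega, by omega⟩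
          · intro h; exact ⟨by omega, by omega⟩
        cases hrest : PySem.List.index? (prefixSums rest (s + δ) K) (-K) with
        | none =>
            simp only [Option.map_none]
            rw [if_congr hiff2 rfl rfl]
            split_ifs <;> rfl
        | some n =>
            simp only [Option.map_some]
            rw [if_congr hiff2 rfl rfl]
            split_ifs with h
            · show min ((n : Int) + (i + 1)) N = min (((n + 1 : Nat) : Int) + i) N
              omega
            · show ((n : Int) + (i + 1)) = (((n + 1 : Nat) : Int) + i)
              omega

theorem letsGo_spec : Claim_equal_letsGo := by
  intro arr N K _
  unfold Spec_letsGo letsGo letsGo_alt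
  have h := key N K arr 2 0
  rw [show K + 0 = K by ring] at h
  rw [h]
  unfold bcomb
  have hiff : ((2:Int) ≤ N ∧ N ≤ 2 + (arr.length : Int) - 1) ↔ ((2:Int) ≤ N ∧ N ≤ (arr.length : Int) + 1) := by
    constructor <;> (intro h; exact ⟨h.1, by omega⟩)
  rw [if_congr hiff rfl rfl]
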